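-- pv_equiv track=rewrite | github.com/debdattasarkar/DSA | 2. GFG/0. All/1. Arrays/(E) Tywin's War Strategy/py_sol.py | minSoldiers
-- ===== SOURCE A (Python) =====
-- def minSoldiers(arr, k):
--     # code here
--     """
--     Returns the minimal total soldiers to add so that at least ceil(n/2)
--     troops have sizes divisible by k.
--
--     Time:  O(n log n)  -- sorting the costs
--     Space: O(n)        -- list of costs (can be optimized to O(1) extra if reused)
--     """
--     n = len(arr)
--     if n == 0:
--         return 0
--     if k == 1:
--         # Every number is divisible by 1; already all lucky
--         return 0
--
--     # Compute extra soldiers needed for each troop to reach next multiple of k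
--     costs = []
--     already = 0
--     for x in arr:
--         r = x % k
--         c = (k - r) % k  # 0 if already multiple; else gap to next multiple
--         if c == 0:
--             already += 1
--         else:
--             costs.append(c)
--
--     target = (n + 1) // 2  # ceil(n/2)
--     need = max(0, target - already)
--     if need == 0:
--         return 0
--
--     costs.sort()
--     return sum(costs[:need])
-- ===== SOURCE B (Python) =====
-- def qsum(cs, m):
--     """Sum of the m smallest elements of cs (quickselect-style partition recursion)."""
--     if m <= 0 or not cs:
--         return 0
--     p = cs[0]
--     less = [x for x in cs if x < p]
--     nl = len(less)
--     if m <= nl: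
--         return qsum(less, m)
--     ne = sum(1 for x in cs if x == p)
--     if m <= nl + ne:
--         return sum(less) + (m - nl) * p
--     greater = [x for x in cs if x > p]
--     return sum(less) + ne * p + qsum(greater, m - nl - ne)
--
--
-- def minSoldiers(arr, k):
--     # Quickselect-style partition recursion: sum the `need` smallest nonzero
--     # costs without ever fully sorting the cost list.
--     n = len(arr)
--     if n == 0:
--         return 0
--     if k == 1:
--         return 0
--     costs = [(k - x % k) % k for x in arr]
--     already = sum(1 for c in costs if c == 0)
--     need = (n + 1) // 2 - already
--     if need <= 0:
--         return 0
--     return qsum([c for c in costs if c != 0], need)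
-- ===== Notes on version B (the rewrite author's own statement) =====
-- stated objective: alternative
-- what changed: B never sorts: it sums the `need` smallest nonzero costs by a quickselect-style partition recursion (partition around a pivot, recurse into one side), while A sorts the whole cost list and sums a prefix.
import Mathlib
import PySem

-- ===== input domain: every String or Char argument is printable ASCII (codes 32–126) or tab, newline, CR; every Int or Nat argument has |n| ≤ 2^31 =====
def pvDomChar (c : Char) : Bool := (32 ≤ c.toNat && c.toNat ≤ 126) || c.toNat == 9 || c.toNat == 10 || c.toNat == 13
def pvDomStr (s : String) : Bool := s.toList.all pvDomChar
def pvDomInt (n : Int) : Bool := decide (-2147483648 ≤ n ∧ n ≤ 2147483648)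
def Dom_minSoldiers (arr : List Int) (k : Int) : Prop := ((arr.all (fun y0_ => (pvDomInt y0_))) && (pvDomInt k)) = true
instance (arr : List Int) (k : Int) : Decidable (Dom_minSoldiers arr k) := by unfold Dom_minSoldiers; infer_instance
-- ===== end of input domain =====

-- B replaces A's "sort all nonzero costs and sum a prefix" by a quickselect-style partition
-- recursion that sums the `need` smallest costs without sorting (objective: alternative).

-- ===== PORT A =====
def minSoldiers (arr : List Int) (k : Int) : Int :=
  let n := arr.length
  if n = 0 then 0
  else if k = 1 then 0
  else
    let st := arr.foldl (fun (s : List Int × Int) x =>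
      let r := PySem.Int.mod x k
      let c := PySem.Int.mod (k - r) k
      ((if c = 0 then s.1 else s.1 ++ [c]), (if c = 0 then s.2 + 1 else s.2))) ([], 0)
    let target := PySem.Int.floordiv ((n : Int) + 1) 2
    let need := max 0 (target - st.2)
    if need = 0 then 0
    else (PySem.List.slice (PySem.List.sorted st.1 (fun x => x) false) none (some need)).sum

-- ===== PORT B =====
-- qsum cs m = sum of the m smallest elements of cs (quickselect partition recursion)
def pvQsum (cs : List Int) (m : Int) : Int :=
  match cs with
  | [] => 0
  | p :: t =>
    if m ≤ 0 then 0
    else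
      let less := (p :: t).filter (fun x => decide (x < p))
      let nl : Int := less.length
      if m ≤ nl then pvQsum less m
      else
        let ne : Int := ((p :: t).countP (fun x => decide (x = p)) : Int)
        if m ≤ nl + ne then less.sum + (m - nl) * p
        else
          let greater := (p :: t).filter (fun x => decide (p < x))
          less.sum + ne * p + pvQsum greater (m - nl - ne)
termination_by cs.length
decreasing_by
  · simp only [List.filter_cons, decide_eq_true_eq, lt_irrefl, if_false, List.length_cons]
    have := List.length_filter_le (fun x => decide (x < p)) t
    omega
  · simp only [List.filter_cons, decide_eq_true_eq, lt_irrefl, if_false, List.length_cons]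
    have := List.length_filter_le (fun x => decide (p < x)) t
    omega

def minSoldiers_alt (arr : List Int) (k : Int) : Int :=
  let n := arr.length
  if n = 0 then 0
  else if k = 1 then 0
  else
    let costs := arr.map (fun x => PySem.Int.mod (k - PySem.Int.mod x k) k)
    let already : Int := (costs.countP (fun c => decide (c = 0)) : Int)
    let need := PySem.Int.floordiv ((n : Int) + 1) 2 - already
    if need ≤ 0 then 0
    else pvQsum (costs.filter (fun c => decide ¬(c = 0))) need

-- ===== PRECONDITION & SPEC =====
-- Pre_ excludes only the inputs where the Python A raises ZeroDivisionError: k = 0 with a nonempty arr.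
def Pre_minSoldiers (arr : List Int) (k : Int) : Prop := arr = [] ∨ k ≠ 0
instance (arr : List Int) (k : Int) : Decidable (Pre_minSoldiers arr k) := by unfold Pre_minSoldiers; infer_instance
def pvWitness_minSoldiers : List Int × Int := ([3, 5, 6, 8], 4)

def Spec_minSoldiers (arr : List Int) (k : Int) (out : Int) : Prop := out = minSoldiers_alt arr k
instance (arr : List Int) (k : Int) (out : Int) : Decidable (Spec_minSoldiers arr k out) := by unfold Spec_minSoldiers; infer_instance

-- ===== CLAIM (what is proved, stated in full; the proofs are below) =====
def Claim_equal_minSoldiers : Prop := ∀ (arr : List Int) (k : Int), Dom_minSoldiers arr k → Pre_minSoldiers arr k → Spec_minSoldiers arr k (minSoldiers arr k)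

-- ===== LEMMAS AND PROOFS =====

-- the cost of troop x: soldiers to the next multiple of k
def pvCost (k x : Int) : Int := PySem.Int.mod (k - PySem.Int.mod x k) k
-- the list of nonzero costs, in arr order (what A's loop collects)
def pvCs (arr : List Int) (k : Int) : List Int :=
  (arr.filter (fun x => decide ¬(pvCost k x = 0))).map (pvCost k)

lemma pv_foldA (arr : List Int) (k : Int) :
    arr.foldl (fun (s : List Int × Int) x =>
      ((if pvCost k x = 0 then s.1 else s.1 ++ [pvCost k x]),
       (if pvCost k x = 0 then s.2 + 1 else s.2))) ([], 0)
    = (pvCs arr k, (arr.countP (fun x => decide (pvCost k x = 0)) : Int)) := by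
  rw [PySem.List.foldl_prod_mk (f := fun l x => if pvCost k x = 0 then l else l ++ [pvCost k x])
      (g := fun a x => if pvCost k x = 0 then a + 1 else a)]
  refine Prod.ext ?_ ?_
  · show arr.foldl (fun l x => if pvCost k x = 0 then l else l ++ [pvCost k x]) [] = pvCs arr k
    have hbody : (fun (l : List Int) x => if pvCost k x = 0 then l else l ++ [pvCost k x])
        = (fun l x => if ¬ pvCost k x = 0 then l ++ [pvCost k x] else l) := by
      funext l x; by_cases h : pvCost k x = 0 <;> simp [h]
    rw [hbody, PySem.List.foldl_append_ite (p := fun x => ¬ pvCost k x = 0) (f := pvCost k)]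
    simp [pvCs]
  · show arr.foldl (fun a x => if pvCost k x = 0 then a + 1 else a) 0 = _
    rw [PySem.List.foldl_ite_add_one (p := fun x => pvCost k x = 0)]
    simp

-- sorted cs decomposes as sorted(<p) ++ (=p) ++ sorted(>p)
lemma pv_sorted_partition (cs : List Int) (p : Int) :
    PySem.List.sorted cs (fun x => x) false
    = PySem.List.sorted (cs.filter (fun x => decide (x < p))) (fun x => x) false
      ++ cs.filter (fun x => decide (x = p))
      ++ PySem.List.sorted (cs.filter (fun x => decide (p < x))) (fun x => x) false := by
  have hperm : (PySem.List.sorted (cs.filter (fun x => decide (x < p))) (fun x => x) false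
      ++ cs.filter (fun x => decide (x = p))
      ++ PySem.List.sorted (cs.filter (fun x => decide (p < x))) (fun x => x) false).Perm cs := by
    have h1 : (PySem.List.sorted (cs.filter (fun x => decide (x < p))) (fun x => x) false
        ++ cs.filter (fun x => decide (x = p))
        ++ PySem.List.sorted (cs.filter (fun x => decide (p < x))) (fun x => x) false).Perm
        (cs.filter (fun x => decide (x < p)) ++ cs.filter (fun x => decide (x = p))
          ++ cs.filter (fun x => decide (p < x))) :=
      ((PySem.List.sorted_perm _ _ _).append (List.Perm.refl _)).append
        (PySem.List.sorted_perm _ _ _)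
    refine h1.trans ?_
    rw [List.perm_iff_count]
    intro v
    have hcL : ∀ (P : Int → Bool), P v = true → (cs.filter P).count v = cs.count v :=
      fun P h => List.count_filter h
    have hc0 : ∀ (P : Int → Bool), P v = false → (cs.filter P).count v = 0 := by
      intro P h
      apply List.count_eq_zero_of_not_mem
      intro hv
      have := (List.mem_filter.mp hv).2
      simp [h] at this
    simp only [List.count_append]
    rcases lt_trichotomy v p with h | h | h
    · rw [hcL (fun x => decide (x < p)) (by simpa using h),
        hc0 (fun x => decide (x = p)) (by simp; omega),
        hc0 (fun x => decide (p < x)) (by simp; omega)]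
      omega
    · rw [hcL (fun x => decide (x = p)) (by simpa using h),
        hc0 (fun x => decide (x < p)) (by simp; omega),
        hc0 (fun x => decide (p < x)) (by simp; omega)]
      omega
    · rw [hcL (fun x => decide (p < x)) (by simpa using h),
        hc0 (fun x => decide (x < p)) (by simp; omega),
        hc0 (fun x => decide (x = p)) (by simp; omega)]
      omega
  refine PySem.List.sorted_id_eq_of_perm_of_pairwise _ _ hperm ?_
  rw [List.pairwise_append, List.pairwise_append]
  refine ⟨⟨by simpa using PySem.List.sorted_pairwise _ (fun x : Int => x), ?_, ?_⟩,
    by simpa using PySem.List.sorted_pairwise _ (fun x : Int => x), ?_⟩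
  · -- the (=p) block is pairwise ≤: all its elements equal p
    rw [List.pairwise_iff_forall_sublist]
    intro a b hab
    have hsub := hab.subset
    have ha1 : a ∈ ([a, b] : List Int) := by simp
    have hb1 : b ∈ ([a, b] : List Int) := by simp
    have ha' := (List.mem_filter.mp (hsub ha1)).2
    have hb' := (List.mem_filter.mp (hsub hb1)).2
    simp only [decide_eq_true_eq] at ha' hb'
    omega
  · intro a ha b hb
    have ha' := (List.mem_filter.mp ((PySem.List.mem_sorted _ _ _ _).mp ha)).2
    have hb' := (List.mem_filter.mp hb).2
    simp only [decide_eq_true_eq] at ha' hb'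
    omega
  · intro a ha b hb
    have hb' := (List.mem_filter.mp ((PySem.List.mem_sorted _ _ _ _).mp hb)).2
    rcases List.mem_append.mp ha with ha | ha
    · have ha' := (List.mem_filter.mp ((PySem.List.mem_sorted _ _ _ _).mp ha)).2
      simp only [decide_eq_true_eq] at ha' hb'
      omega
    · have ha' := (List.mem_filter.mp ha).2
      simp only [decide_eq_true_eq] at ha' hb'
      omega

-- the (=p) block is a replicate
lemma pv_filter_eq_replicate (cs : List Int) (p : Int) :
    cs.filter (fun x => decide (x = p)) = List.replicate (cs.countP (fun x => decide (x = p))) p := by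
  refine List.eq_replicate_iff.mpr ⟨?_, ?_⟩
  · simp [List.countP_eq_length_filter]
  · intro b hb
    have := (List.mem_filter.mp hb).2
    simpa using this

-- quickselect sums the m smallest
lemma pvQsum_eq (cs : List Int) (m : Int) :
    pvQsum cs m = ((PySem.List.sorted cs (fun x => x) false).take m.toNat).sum := by
  fun_induction pvQsum cs m with
  | case1 m => simp [PySem.List.sorted]
  | case2 m p t hm => simp [Int.toNat_of_nonpos hm]
  | case3 m p t hm less nl hle ih =>
      have hless : less = (p :: t).filter (fun x => decide (x < p)) := rfl
      have hnl : nl = (less.length : Int) := rfl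
      clear_value less nl
      subst hless hnl
      have hlen : m.toNat ≤ (PySem.List.sorted ((p :: t).filter (fun x => decide (x < p)))
          (fun x => x) false).length := by
        rw [PySem.List.length_sorted]; omega
      rw [ih, pv_sorted_partition (p :: t) p, List.append_assoc,
        List.take_append_of_le_length hlen]
  | case4 m p t hm less nl hgt ne hle =>
      have hless : less = (p :: t).filter (fun x => decide (x < p)) := rfl
      have hnl : nl = (less.length : Int) := rfl
      have hne : ne = ((p :: t).countP (fun x => decide (x = p)) : Int) := rfl
      clear_value less nl ne
      subst hless hnl hne
      simp only [not_le] at hgt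
      rw [pv_sorted_partition (p :: t) p, List.append_assoc, List.take_append,
        List.take_append, pv_filter_eq_replicate (p :: t) p, List.take_replicate,
        List.sum_append, List.sum_append]
      set L := (p :: t).filter (fun x => decide (x < p)) with hL
      set cE := (p :: t).countP (fun x => decide (x = p)) with hcE
      have hslen : (PySem.List.sorted L (fun x => x) false).length = L.length :=
        PySem.List.length_sorted _ _ _
      rw [List.take_of_length_le (by rw [hslen]; omega :
        (PySem.List.sorted L (fun x => x) false).length ≤ m.toNat)]
      have h1 : min (m.toNat - (PySem.List.sorted L (fun x => x) false).length) cE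
          = m.toNat - L.length := by rw [hslen]; omega
      have h2 : m.toNat - (PySem.List.sorted L (fun x => x) false).length
          - (List.replicate cE p).length = 0 := by
        rw [List.length_replicate, hslen]; omega
      rw [h1, h2]
      simp only [List.take_zero, List.sum_nil, add_zero, List.sum_replicate, nsmul_eq_mul]
      rw [(PySem.List.sorted_perm L (fun x => x) false).sum_eq]
      have h3 : ((m.toNat - L.length : Nat) : Int) = m - (L.length : Int) := by omega
      rw [h3]
  | case5 m p t hm less nl hgt ne hgt2 greater ih =>
      have hless : less = (p :: t).filter (fun x => decide (x < p)) := rfl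
      have hnl : nl = (less.length : Int) := rfl
      have hne : ne = ((p :: t).countP (fun x => decide (x = p)) : Int) := rfl
      have hgr : greater = (p :: t).filter (fun x => decide (p < x)) := rfl
      clear_value less nl ne greater
      subst hless hnl hne hgr
      simp only [not_le] at hgt hgt2
      rw [ih, pv_sorted_partition (p :: t) p, List.append_assoc, List.take_append,
        List.take_append, pv_filter_eq_replicate (p :: t) p, List.take_replicate,
        List.sum_append, List.sum_append]
      set L := (p :: t).filter (fun x => decide (x < p)) with hL
      set G := (p :: t).filter (fun x => decide (p < x)) with hG
      set cE := (p :: t).countP (fun x => decide (x = p)) with hcE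
      have hslen : (PySem.List.sorted L (fun x => x) false).length = L.length :=
        PySem.List.length_sorted _ _ _
      rw [List.take_of_length_le (by rw [hslen]; omega :
        (PySem.List.sorted L (fun x => x) false).length ≤ m.toNat)]
      have h1 : min (m.toNat - (PySem.List.sorted L (fun x => x) false).length) cE = cE := by
        rw [hslen]; omega
      have h2 : m.toNat - (PySem.List.sorted L (fun x => x) false).length
          - (List.replicate cE p).length
          = (m - (L.length : Int) - (cE : Int)).toNat := by
        rw [List.length_replicate, hslen]; omega
      rw [h1, h2]
      simp only [List.sum_replicate, nsmul_eq_mul]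
      rw [(PySem.List.sorted_perm L (fun x => x) false).sum_eq]
      ring

-- filter/countP of a map pulled back to arr
lemma pv_costs_filter (arr : List Int) (k : Int) :
    (arr.map (pvCost k)).filter (fun c => decide ¬(c = 0)) = pvCs arr k := by
  rw [List.filter_map]
  rfl

lemma pv_costs_count (arr : List Int) (k : Int) :
    (arr.map (pvCost k)).countP (fun c => decide (c = 0))
    = arr.countP (fun x => decide (pvCost k x = 0)) := by
  rw [List.countP_map]
  rfl

-- ===== VERDICT (by name: the statement is the Claim_ definition above) =====
theorem minSoldiers_spec : Claim_equal_minSoldiers := by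
  intro arr k _ _
  show minSoldiers arr k = minSoldiers_alt arr k
  rcases eq_or_ne arr [] with harr | harr
  · subst harr; rfl
  · have hlen : ¬ arr.length = 0 := by simpa using harr
    have e1 : minSoldiers arr k = (if arr.length = 0 then 0 else if k = 1 then 0 else
        let st := arr.foldl (fun (s : List Int × Int) x =>
          ((if pvCost k x = 0 then s.1 else s.1 ++ [pvCost k x]),
           (if pvCost k x = 0 then s.2 + 1 else s.2))) ([], 0)
        let need := max 0 (PySem.Int.floordiv ((arr.length : Int) + 1) 2 - st.2)
        if need = 0 then 0
        else (PySem.List.slice (PySem.List.sorted st.1 (fun x => x) false) none (some need)).sum) := rfl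
    have e2 : minSoldiers_alt arr k = (if arr.length = 0 then 0 else if k = 1 then 0 else
        let costs := arr.map (pvCost k)
        let already : Int := (costs.countP (fun c => decide (c = 0)) : Int)
        let need := PySem.Int.floordiv ((arr.length : Int) + 1) 2 - already
        if need ≤ 0 then 0
        else pvQsum (costs.filter (fun c => decide ¬(c = 0))) need) := rfl
    rw [e1, e2, if_neg hlen, if_neg hlen]
    by_cases hk1 : k = 1
    · simp [hk1]
    · rw [if_neg hk1, if_neg hk1]
      simp only [pv_foldA, pv_costs_filter, pv_costs_count]
      set already : Int := (arr.countP (fun x => decide (pvCost k x = 0)) : Int)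
      set target := PySem.Int.floordiv ((arr.length : Int) + 1) 2
      by_cases hneed : target - already ≤ 0
      · rw [if_pos hneed]
        have : max 0 (target - already) = 0 := by omega
        simp [this]
      · rw [if_neg hneed]
        have hmax : max 0 (target - already) = target - already := by omega
        have hnz : ¬ max 0 (target - already) = 0 := by omega
        rw [if_neg hnz, hmax]
        rw [PySem.List.slice_to _ (by omega : (0:Int) ≤ target - already)]
        rw [pvQsum_eq]
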